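-- pv_equiv track=rewrite | github.com/WG-Forge/Team-Segfault | game/map/hex.py | make_ring
-- ===== SOURCE A (Python) =====
-- def make_ring(ring_num: int) -> tuple[tuple[int, int, int]]:
--     # Makes all the possible coordinates in a given ring around (0,0,0)
--     ring_coords = []
--     max_crd = ring_num
--     min_crd = -ring_num
--     required_abs_sum = ring_num * 2
--     for i in range(min_crd, max_crd + 1):
--         for j in range(max(min_crd, min_crd - i), min(max_crd, max_crd - i) + 1):
--             k = -i - j
--             if abs(i) + abs(j) + abs(k) == required_abs_sum:
--                 ring_coords.append((i, j, k))
--     return tuple(ring_coords)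
-- ===== SOURCE B (Python) =====
-- def make_ring(ring_num: int) -> tuple[tuple[int, int, int]]:
--     # Directly enumerate the boundary cells of the ring instead of filtering a full square.
--     n = ring_num
--     if n < 0:
--         return ()
--     if n == 0:
--         return ((0, 0, 0),)
--     coords = []
--     for i in range(-n, n + 1):
--         if i == -n:
--             js = range(0, n + 1)
--         elif i == n:
--             js = range(-n, 1)
--         elif i < 0:
--             js = (-n - i, n)
--         else:
--             js = (-n, n - i)
--         for j in js:
--             coords.append((i, j, -i - j))
--     return tuple(coords)
-- ===== Notes on version B (the rewrite author's own statement) =====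
-- stated objective: faster
-- what changed: B enumerates the ring's ~6n boundary cells directly per row (two endpoint j's for interior rows, a full segment for the extreme rows) instead of scanning the full (2n+1)x(2n+1) square and filtering by the absolute-sum test.
import Mathlib
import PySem

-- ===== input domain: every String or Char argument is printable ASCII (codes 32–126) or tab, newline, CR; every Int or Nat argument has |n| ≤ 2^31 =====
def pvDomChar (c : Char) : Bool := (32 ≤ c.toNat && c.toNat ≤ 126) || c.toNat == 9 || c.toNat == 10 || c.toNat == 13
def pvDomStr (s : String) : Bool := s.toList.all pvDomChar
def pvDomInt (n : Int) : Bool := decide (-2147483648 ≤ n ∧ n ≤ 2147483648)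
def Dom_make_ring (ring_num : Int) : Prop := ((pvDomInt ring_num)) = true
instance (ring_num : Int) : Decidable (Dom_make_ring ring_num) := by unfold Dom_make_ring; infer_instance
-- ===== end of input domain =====

-- B enumerates the ~6n boundary cells of the hex ring directly (O(n)) instead of
-- filtering the full (2n+1)² square as A does (O(n²)); objective: faster.

-- ===== PORT A =====
def make_ring (ring_num : Int) : List (List Int) :=
  let max_crd := ring_num
  let min_crd := -ring_num
  let required_abs_sum := ring_num * 2
  (PySem.List.pyRange min_crd (max_crd + 1) 1).foldl (fun acc i =>
    (PySem.List.pyRange (max min_crd (min_crd - i)) (min max_crd (max_crd - i) + 1) 1).foldl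
      (fun acc j =>
        let k := -i - j
        if |i| + |j| + |k| = required_abs_sum then acc ++ [[i, j, k]] else acc)
      acc) []

-- ===== PORT B =====
def make_ring_alt (ring_num : Int) : List (List Int) :=
  let n := ring_num
  if n < 0 then []
  else if n = 0 then [[0, 0, 0]]
  else
    (PySem.List.pyRange (-n) (n + 1) 1).foldl (fun acc i =>
      let js : List Int :=
        if i = -n then PySem.List.pyRange 0 (n + 1) 1
        else if i = n then PySem.List.pyRange (-n) 1 1
        else if i < 0 then [-n - i, n]
        else [-n, n - i]
      js.foldl (fun acc j => acc ++ [[i, j, -i - j]]) acc) []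

-- ===== PRECONDITION & SPEC =====
def Spec_make_ring (ring_num : Int) (out : List (List Int)) : Prop := out = make_ring_alt ring_num
instance (ring_num : Int) (out : List (List Int)) : Decidable (Spec_make_ring ring_num out) := by unfold Spec_make_ring; infer_instance

-- ===== CLAIM (what is proved, stated in full; the proofs are below) =====
def Claim_equal_make_ring : Prop := ∀ (ring_num : Int), Dom_make_ring ring_num → Spec_make_ring ring_num (make_ring ring_num)

-- ===== LEMMAS AND PROOFS =====

-- A's inner filtered range, laid out as a filter.
def innerA (n i : Int) : List (List Int) :=
  ((PySem.List.pyRange (max (-n) (-n - i)) (min n (n - i) + 1) 1).filter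
    (fun j => decide (|i| + |j| + |(-i - j)| = n * 2))).map (fun j => [i, j, -i - j])

def jsB (n i : Int) : List Int :=
  if i = -n then PySem.List.pyRange 0 (n + 1) 1
  else if i = n then PySem.List.pyRange (-n) 1 1
  else if i < 0 then [-n - i, n]
  else [-n, n - i]

theorem make_ring_eq_flatMap (n : Int) :
    make_ring n = (PySem.List.pyRange (-n) (n + 1) 1).flatMap (innerA n) := by
  unfold make_ring innerA
  rw [PySem.List.foldl_congr_mem
    (g := fun acc i => acc ++ ((PySem.List.pyRange (max (-n) (-n - i)) (min n (n - i) + 1) 1).filter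
      (fun j => decide (|i| + |j| + |(-i - j)| = n * 2))).map (fun j => [i, j, -i - j]))]
  · rw [PySem.List.foldl_append_eq_flatMap]
    simp
  · intro acc i _
    rw [PySem.List.foldl_append_ite (p := fun j => |i| + |j| + |(-i - j)| = n * 2)
      (f := fun j => [i, j, -i - j])]

theorem make_ring_alt_eq_flatMap (n : Int) (hn : 0 < n) :
    make_ring_alt n = (PySem.List.pyRange (-n) (n + 1) 1).flatMap
      (fun i => (jsB n i).map (fun j => [i, j, -i - j])) := by
  unfold make_ring_alt jsB
  rw [if_neg (by omega), if_neg (by omega)]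
  rw [PySem.List.foldl_congr_mem
    (g := fun acc i => acc ++ ((if i = -n then PySem.List.pyRange 0 (n + 1) 1
        else if i = n then PySem.List.pyRange (-n) 1 1
        else if i < 0 then [-n - i, n]
        else [-n, n - i]).map (fun j => [i, j, -i - j])))]
  · rw [PySem.List.foldl_append_eq_flatMap]
    simp
  · intro acc i _
    simp only []
    rw [PySem.List.foldl_append_singleton_eq_map]

theorem filter_endpoints (p : Int → Bool) (a b : Int) (hab : a < b)
    (ha : p a = true) (hb : p b = true) (hmid : ∀ j, a < j → j < b → p j = false) :
    (PySem.List.pyRange a (b + 1) 1).filter p = [a, b] := by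
  rw [PySem.List.pyRange_one_succ_right (le_of_lt hab),
      PySem.List.pyRange_one_cons hab, List.filter_append]
  have hnil : (PySem.List.pyRange (a + 1) b 1).filter p = [] := by
    apply List.filter_eq_nil_iff.mpr
    intro j hj
    have := (PySem.List.mem_pyRange_one).mp hj
    simp [hmid j (by omega) (by omega)]
  simp [ha, hb, hnil]

theorem filter_all (p : Int → Bool) (a b : Int)
    (h : ∀ j, a ≤ j → j < b → p j = true) :
    (PySem.List.pyRange a b 1).filter p = PySem.List.pyRange a b 1 := by
  apply List.filter_eq_self.mpr
  intro j hj
  have := (PySem.List.mem_pyRange_one).mp hj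
  exact h j this.1 this.2

theorem innerA_eq (n i : Int) (hn : 0 < n) (hi1 : -n ≤ i) (hi2 : i ≤ n) :
    innerA n i = (jsB n i).map (fun j => [i, j, -i - j]) := by
  unfold innerA jsB
  congr 1
  by_cases hA : i = -n
  · rw [if_pos hA]
    have h1 : max (-n) (-n - i) = 0 := by omega
    have h2 : min n (n - i) = n := by omega
    rw [h1, h2]
    apply filter_all
    intro j hj1 hj2
    simp only [decide_eq_true_eq, Int.abs_eq_natAbs]
    omega
  · rw [if_neg hA]
    by_cases hB : i = n
    · rw [if_pos hB]
      have h1 : max (-n) (-n - i) = -n := by omega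
      have h2 : min n (n - i) + 1 = 1 := by omega
      rw [h1, h2]
      apply filter_all
      intro j hj1 hj2
      simp only [decide_eq_true_eq, Int.abs_eq_natAbs]
      omega
    · rw [if_neg hB]
      by_cases hC : i < 0
      · rw [if_pos hC]
        have h1 : max (-n) (-n - i) = -n - i := by omega
        have h2 : min n (n - i) = n := by omega
        rw [h1, h2]
        apply filter_endpoints _ _ _ (by omega)
        · simp only [decide_eq_true_eq, Int.abs_eq_natAbs]; omega
        · simp only [decide_eq_true_eq, Int.abs_eq_natAbs]; omega
        · intro j hj1 hj2
          simp only [decide_eq_false_iff_not, Int.abs_eq_natAbs]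
          omega
      · rw [if_neg hC]
        have h1 : max (-n) (-n - i) = -n := by omega
        have h2 : min n (n - i) = n - i := by omega
        rw [h1, h2]
        apply filter_endpoints _ _ _ (by omega)
        · simp only [decide_eq_true_eq, Int.abs_eq_natAbs]; omega
        · simp only [decide_eq_true_eq, Int.abs_eq_natAbs]; omega
        · intro j hj1 hj2
          simp only [decide_eq_false_iff_not, Int.abs_eq_natAbs]
          omega

-- ===== VERDICT (by name: the statement is the Claim_ definition above) =====
theorem make_ring_spec : Claim_equal_make_ring := by
  intro n _
  unfold Spec_make_ring
  by_cases hneg : n < 0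
  · rw [make_ring_eq_flatMap, PySem.List.pyRange_one_eq_nil (a := -n) (b := n + 1) (by omega)]
    unfold make_ring_alt
    rw [if_pos hneg]
    rfl
  · by_cases hz : n = 0
    · subst hz; decide
    · have hn : 0 < n := by omega
      rw [make_ring_eq_flatMap, make_ring_alt_eq_flatMap n hn]
      have : ∀ i ∈ PySem.List.pyRange (-n) (n + 1) 1,
          innerA n i = (jsB n i).map (fun j => [i, j, -i - j]) := by
        intro i hi
        have := (PySem.List.mem_pyRange_one).mp hi
        exact innerA_eq n i hn this.1 (by omega)
      simp only [List.flatMap]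
      rw [List.map_congr_left this]
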